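-- pv_equiv track=rewrite | github.com/dzikimlecz/wdi | z4/t_02.py | z2
-- ===== SOURCE A (Python) =====
-- def containsOddDigit(n):
--     while n > 0:
--         if (n % 10) % 2 == 1:
--             return True
--         n //= 10
--     return False
--
-- def z2(t):
--     for row in t:
--         for k in row:
--             if containsOddDigit(k):
--                 break
--         else:
--             return False
--     return True
-- ===== SOURCE B (Python) =====
-- def z2(t):
--     odd = set('13579')
--     return all(not odd.isdisjoint(str(row)) for row in t)
-- ===== Notes on version B (the rewrite author's own statement) =====
-- stated objective: idiomatic
-- what changed: B drops the per-element digit-peeling loop entirely: each row is rendered once as its string repr and the question becomes a single set-disjointness test between that string and the odd-digit set, so there is no inner loop over elements or digits in B's code.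
-- intended difference: On inputs where every row contains an element whose absolute value has an odd decimal digit but in some row all such elements are negative (no positive element of that row has an odd digit), A returns False because its 'while n > 0' loop never inspects the digits of non-positive numbers, while B returns True, the intended answer since e.g. -3 does contain the odd digit 3. — e.g. on z2([[-3]]): A returns false, B returns true
import Mathlib
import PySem

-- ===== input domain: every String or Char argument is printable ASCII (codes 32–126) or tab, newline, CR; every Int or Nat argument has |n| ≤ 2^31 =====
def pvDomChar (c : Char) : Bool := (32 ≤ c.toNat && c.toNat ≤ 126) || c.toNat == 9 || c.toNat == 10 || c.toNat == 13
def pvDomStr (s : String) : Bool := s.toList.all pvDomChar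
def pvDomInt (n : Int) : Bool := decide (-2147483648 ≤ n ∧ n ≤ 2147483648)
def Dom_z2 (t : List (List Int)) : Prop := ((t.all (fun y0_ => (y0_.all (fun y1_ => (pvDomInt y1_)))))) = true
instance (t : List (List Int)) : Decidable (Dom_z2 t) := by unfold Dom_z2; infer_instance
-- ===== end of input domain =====

-- B renders each row once as its list-repr string and tests set-disjointness with the odd
-- digits, instead of A's per-element digit-peeling loop (objective: idiomatic; same cost).


-- ===== PORT A =====
-- while n > 0: if (n % 10) % 2 == 1: return True; n //= 10; return False
def containsOddDigit (n : Int) : Bool :=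
  if _h : n > 0 then
    if PySem.Int.mod (PySem.Int.mod n 10) 2 == 1 then true
    else containsOddDigit (PySem.Int.floordiv n 10)
  else false
termination_by n.toNat
decreasing_by
  have h10 : PySem.Int.floordiv n 10 = n / 10 := PySem.Int.floordiv_eq_ediv_of_pos (by omega)
  rw [h10]; omega

-- inner 'for k in row: if containsOddDigit(k): break' (true = broke out)
def z2Row (row : List Int) : Bool :=
  match row with
  | [] => false
  | k :: rest => if containsOddDigit k then true else z2Row rest

-- outer 'for row in t: … else: return False; return True'
def z2 (t : List (List Int)) : Bool :=
  match t with
  | [] => true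
  | row :: rest => if z2Row row then z2 rest else false

-- ===== PORT B =====
-- odd = set('13579')
def oddSet : PySem.Set Char := PySem.Set.ofList ['1', '3', '5', '7', '9']

-- str(row): CPython's repr of a list of ints, ported by hand (exact for list[int]):
-- '[' + the elements' reprs joined by ', ' + ']'
def commaJoin : List (List Char) → List Char
  | [] => []
  | [s] => s
  | s :: rest => s ++ ',' :: ' ' :: commaJoin rest

def rowRepr (row : List Int) : List Char :=
  '[' :: commaJoin (row.map PySem.Int.toChars) ++ [']']

-- all(not odd.isdisjoint(str(row)) for row in t); 'not isdisjoint' = some char is in odd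
def z2_alt (t : List (List Int)) : Bool :=
  t.all (fun row => (rowRepr row).any (fun c => oddSet.contains c))

-- ===== PRECONDITION & SPEC =====
-- On inputs where every row contains an element whose absolute value has an odd decimal digit
-- but in some row all such elements are negative, A returns False (its 'while n > 0' loop
-- never inspects the digits of non-positive numbers) while B returns True, the intended
-- answer: -3 does contain the odd digit 3.
def D_z2 (t : List (List Int)) : Prop :=
  (∀ row ∈ t, ∃ k ∈ row, ∃ d ∈ Nat.digits 10 k.natAbs, d % 2 = 1) ∧
  (∃ row ∈ t, ∀ k ∈ row, ∀ d ∈ Nat.digits 10 k.toNat, d % 2 = 0)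
instance (t : List (List Int)) : Decidable (D_z2 t) := by unfold D_z2; infer_instance

def Spec_z2 (t : List (List Int)) (out : Bool) : Prop := ¬ D_z2 t → out = z2_alt t
instance (t : List (List Int)) (out : Bool) : Decidable (Spec_z2 t out) := by unfold Spec_z2; infer_instance

def pvDiffWitness_z2 : List (List Int) := [[-3]]
def pvDiffWitnessOut_z2 : Bool × Bool := (false, true)

-- ===== CLAIM (what is proved, stated in full; the proofs are below) =====
def Claim_unchanged_z2 : Prop := ∀ (t : List (List Int)), Dom_z2 t → Spec_z2 t (z2 t)
def Claim_changed_z2 : Prop := Dom_z2 (pvDiffWitness_z2) ∧ D_z2 (pvDiffWitness_z2) ∧ z2 (pvDiffWitness_z2) = pvDiffWitnessOut_z2.1 ∧ z2_alt (pvDiffWitness_z2) = pvDiffWitnessOut_z2.2 ∧ pvDiffWitnessOut_z2.1 ≠ pvDiffWitnessOut_z2.2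
def Claim_exact_z2 : Prop := ∀ (t : List (List Int)), Dom_z2 t → D_z2 t → z2 t ≠ z2_alt t

-- ===== LEMMAS AND PROOFS =====

-- proof-side predicate: 'n : Nat has an odd decimal digit', by A's peeling scheme (fuel-based)
def hasOddAux : Nat → Nat → Bool
  | 0, _ => false
  | fuel + 1, n => (n % 10 % 2 == 1) || (if n / 10 = 0 then false else hasOddAux fuel (n / 10))

def hasOddNat (n : Nat) : Bool := hasOddAux n n

lemma hasOddAux_congr (f1 : Nat) : ∀ (f2 n : Nat), n ≤ f1 → n ≤ f2 →
    hasOddAux f1 n = hasOddAux f2 n := by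
  induction f1 with
  | zero =>
    intro f2 n h1 _
    interval_cases n
    cases f2 <;> simp [hasOddAux]
  | succ f1 ih =>
    intro f2 n h1 h2
    match f2, n with
    | 0, n => interval_cases n; simp [hasOddAux]
    | f2 + 1, n =>
      rw [hasOddAux, hasOddAux]
      by_cases h0 : n / 10 = 0
      · rw [if_pos h0, if_pos h0]
      · rw [if_neg h0, if_neg h0, ih f2 (n / 10) (by omega) (by omega)]

lemma hasOddNat_unfold (n : Nat) :
    hasOddNat n
      = ((n % 10 % 2 == 1) || (if n / 10 = 0 then false else hasOddNat (n / 10))) := by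
  unfold hasOddNat
  match n with
  | 0 => simp [hasOddAux]
  | n + 1 =>
    rw [hasOddAux]
    by_cases h0 : (n + 1) / 10 = 0
    · rw [if_pos h0, if_pos h0]
    · rw [if_neg h0, if_neg h0, hasOddAux_congr n ((n + 1) / 10) ((n + 1) / 10)
        (by omega) (by omega)]

lemma hasOdd_iff (n : Nat) :
    hasOddNat n = true ↔ ∃ d ∈ Nat.digits 10 n, d % 2 = 1 := by
  induction n using Nat.strong_induction_on with
  | _ n ih =>
    rcases Nat.eq_zero_or_pos n with h0 | hpos
    · subst h0
      simp [hasOddNat, hasOddAux]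
    · rw [hasOddNat_unfold, Nat.digits_def' (by norm_num : 1 < 10) hpos]
      by_cases h0 : n / 10 = 0
      · rw [if_pos h0, h0]
        simp only [Bool.or_false, beq_iff_eq, Nat.digits_zero, List.mem_cons]
        constructor
        · exact fun h => ⟨n % 10, Or.inl rfl, h⟩
        · rintro ⟨d, hd, hodd⟩
          rcases hd with rfl | hd
          · exact hodd
          · simp at hd
      · rw [if_neg h0, Bool.or_eq_true, beq_iff_eq, ih (n / 10) (by omega)]
        constructor
        · rintro (h | ⟨d, hd, hodd⟩)
          · exact ⟨n % 10, List.mem_cons_self .., h⟩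
          · exact ⟨d, List.mem_cons_of_mem _ hd, hodd⟩
        · rintro ⟨d, hd, hodd⟩
          rcases List.mem_cons.mp hd with rfl | hd
          · exact Or.inl hodd
          · exact Or.inr ⟨d, hd, hodd⟩

lemma bElem_iff (k : Int) :
    (decide (k ≠ 0) && hasOddNat k.natAbs) = true
      ↔ ∃ d ∈ Nat.digits 10 k.natAbs, d % 2 = 1 := by
  simp only [Bool.and_eq_true, decide_eq_true_eq, hasOdd_iff]
  constructor
  · exact fun h => h.2
  · intro h
    refine ⟨fun hk => ?_, h⟩
    subst hk
    simp at h

lemma aElem_iff (k : Int) :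
    (decide (0 < k) && hasOddNat k.toNat) = true
      ↔ ∃ d ∈ Nat.digits 10 k.toNat, d % 2 = 1 := by
  simp only [Bool.and_eq_true, decide_eq_true_eq, hasOdd_iff]
  constructor
  · exact fun h => h.2
  · intro h
    have : k.toNat ≠ 0 := by
      intro hz
      rw [hz] at h
      simp at h
    exact ⟨by omega, h⟩

lemma podd_digitChar (n : Nat) (h : n < 10) :
    oddSet.contains (Nat.digitChar n) = (n % 2 == 1) := by
  interval_cases n <;> decide

lemma any_toDigitsCore (fuel n : Nat) (acc : List Char) (hf : n < fuel) :
    (Nat.toDigitsCore 10 fuel n acc).any (fun c => oddSet.contains c)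
      = (hasOddNat n || acc.any (fun c => oddSet.contains c)) := by
  induction fuel generalizing n acc with
  | zero => omega
  | succ fuel ih =>
    rw [Nat.toDigitsCore, hasOddNat_unfold]
    by_cases h0 : n / 10 = 0
    · rw [if_pos h0, if_pos h0, List.any_cons,
        podd_digitChar _ (Nat.mod_lt _ (by norm_num)), Bool.or_false]
    · rw [if_neg h0, if_neg h0, ih (n / 10) _ (by omega), List.any_cons,
        podd_digitChar _ (Nat.mod_lt _ (by norm_num))]
      rw [Bool.or_left_comm, Bool.or_assoc]

lemma any_toDigits (m : Nat) :
    (Nat.toDigits 10 m).any (fun c => oddSet.contains c) = hasOddNat m := by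
  rw [Nat.toDigits, any_toDigitsCore (m + 1) m [] (by omega), List.any_nil, Bool.or_false]

-- the characters of str(k) contain an odd digit iff k ≠ 0 and |k| has an odd digit
lemma toChars_any (k : Int) :
    (PySem.Int.toChars k).any (fun c => oddSet.contains c)
      = (decide (k ≠ 0) && hasOddNat k.natAbs) := by
  unfold PySem.Int.toChars
  by_cases hneg : k < 0
  · rw [if_pos hneg, List.any_cons, any_toDigits, decide_eq_true (by omega : k ≠ 0),
      (by decide : oddSet.contains '-' = false), Bool.false_or, Bool.true_and]
  · rw [if_neg hneg, any_toDigits]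
    by_cases h0 : k = 0
    · subst h0; decide
    · rw [(by omega : k.toNat = k.natAbs), decide_eq_true h0, Bool.true_and]

lemma commaJoin_any (parts : List (List Char)) :
    (commaJoin parts).any (fun c => oddSet.contains c)
      = parts.any (fun s => s.any (fun c => oddSet.contains c)) := by
  induction parts with
  | nil => rfl
  | cons s rest ih =>
    cases rest with
    | nil => simp [commaJoin]
    | cons s2 rest2 =>
      have hu : commaJoin (s :: s2 :: rest2)
          = s ++ (',' :: ' ' :: commaJoin (s2 :: rest2)) := rfl
      rw [hu, List.any_append, List.any_cons, List.any_cons, ih,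
        (by decide : oddSet.contains ',' = false),
        (by decide : oddSet.contains ' ' = false), Bool.false_or, Bool.false_or,
        List.any_cons, List.any_cons, List.any_cons]

lemma rowRepr_any (row : List Int) :
    (rowRepr row).any (fun c => oddSet.contains c)
      = row.any (fun k => decide (k ≠ 0) && hasOddNat k.natAbs) := by
  rw [rowRepr]
  simp only [List.any_cons, List.any_append, commaJoin_any, List.any_map, List.any_nil,
    Function.comp_def, (by decide : oddSet.contains '[' = false),
    (by decide : oddSet.contains ']' = false), Bool.false_or, Bool.or_false]
  simp only [toChars_any]

-- A's per-element loop computes: k is positive and has an odd digit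
lemma containsOddDigit_eq (k : Int) :
    containsOddDigit k = (decide (0 < k) && hasOddNat k.toNat) := by
  by_cases hk : 0 < k
  · rw [decide_eq_true hk, Bool.true_and]
    rw [containsOddDigit, dif_pos hk, hasOddNat_unfold]
    have hm : PySem.Int.mod k 10 = k % 10 := PySem.Int.mod_eq_emod_of_pos (by omega)
    have hm2 : PySem.Int.mod (k % 10) 2 = k % 10 % 2 := PySem.Int.mod_eq_emod_of_pos (by omega)
    have hd : PySem.Int.floordiv k 10 = k / 10 := PySem.Int.floordiv_eq_ediv_of_pos (by omega)
    rw [hm, hm2, hd]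
    have hmod : k % 10 % 2 = ((k.toNat % 10 % 2 : Nat) : Int) := by omega
    by_cases ho : k.toNat % 10 % 2 = 1
    · rw [if_pos (by rw [hmod, ho]; rfl)]
      simp [ho]
    · rw [if_neg (by rw [hmod]; simp only [beq_iff_eq]; omega)]
      have hb : (k.toNat % 10 % 2 == 1) = false := beq_eq_false_iff_ne.mpr ho
      rw [hb, Bool.false_or]
      by_cases h0 : k.toNat / 10 = 0
      · rw [if_pos h0]
        have hz : k / 10 = 0 := by omega
        rw [hz, containsOddDigit, dif_neg (by omega)]
      · rw [if_neg h0]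
        rw [containsOddDigit_eq (k / 10), decide_eq_true (by omega : (0:Int) < k / 10),
          Bool.true_and, (by omega : (k / 10).toNat = k.toNat / 10)]
  · rw [containsOddDigit, dif_neg (by omega), decide_eq_false hk, Bool.false_and]
termination_by k.toNat
decreasing_by omega

lemma z2Row_eq (row : List Int) :
    z2Row row = row.any (fun k => decide (0 < k) && hasOddNat k.toNat) := by
  induction row with
  | nil => rfl
  | cons k rest ih =>
    rw [z2Row, List.any_cons, ih, containsOddDigit_eq]
    cases (decide (0 < k) && hasOddNat k.toNat) <;> simp

lemma z2_eq (t : List (List Int)) :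
    z2 t = t.all (fun row => row.any (fun k => decide (0 < k) && hasOddNat k.toNat)) := by
  induction t with
  | nil => rfl
  | cons row rest ih =>
    rw [z2, z2Row_eq, List.all_cons, ih]
    cases (row.any (fun k => decide (0 < k) && hasOddNat k.toNat)) <;> simp

lemma z2_alt_eq (t : List (List Int)) :
    z2_alt t = t.all (fun row => row.any (fun k => decide (k ≠ 0) && hasOddNat k.natAbs)) := by
  unfold z2_alt
  simp only [rowRepr_any]

lemma elem_mono (k : Int) (h : (decide (0 < k) && hasOddNat k.toNat) = true) :
    (decide (k ≠ 0) && hasOddNat k.natAbs) = true := by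
  simp only [Bool.and_eq_true, decide_eq_true_eq] at h ⊢
  obtain ⟨h1, h2⟩ := h
  exact ⟨by omega, by rwa [(by omega : k.natAbs = k.toNat)]⟩

lemma rowA_false (row : List Int)
    (hfail : ∀ k ∈ row, ∀ d ∈ Nat.digits 10 k.toNat, d % 2 = 0) :
    (row.any (fun k => decide (0 < k) && hasOddNat k.toNat)) = false := by
  rw [List.any_eq_false]
  intro k hk h
  obtain ⟨d, hd, hodd⟩ := (aElem_iff k).mp h
  have := hfail k hk d hd
  omega

-- ===== VERDICT (by name: the statements are the Claim_ definitions above) =====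
theorem z2_spec : Claim_unchanged_z2 := by
  intro t _ hD
  rw [z2_eq, z2_alt_eq]
  cases hA : t.all (fun row => row.any (fun k => decide (0 < k) && hasOddNat k.toNat)) with
  | true =>
    symm
    simp only [List.all_eq_true, List.any_eq_true] at hA ⊢
    intro row hrow
    obtain ⟨k, hk, h⟩ := hA row hrow
    exact ⟨k, hk, elem_mono k h⟩
  | false =>
    cases hB : t.all (fun row => row.any (fun k => decide (k ≠ 0) && hasOddNat k.natAbs)) with
    | false => rfl
    | true =>
      exfalso
      apply hD
      constructor
      · simp only [List.all_eq_true, List.any_eq_true] at hB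
        intro row hrow
        obtain ⟨k, hk, h⟩ := hB row hrow
        exact ⟨k, hk, (bElem_iff k).mp h⟩
      · rw [List.all_eq_false] at hA
        obtain ⟨row, hrow, hfailb⟩ := hA
        refine ⟨row, hrow, fun k hk d hd => ?_⟩
        rw [Bool.not_eq_true, List.any_eq_false] at hfailb
        have hne := hfailb k hk
        have : ¬ ∃ d ∈ Nat.digits 10 k.toNat, d % 2 = 1 := fun hex =>
          hne ((aElem_iff k).mpr hex)
        have hd2 := Nat.mod_two_eq_zero_or_one d
        rcases hd2 with h2 | h2
        · exact h2
        · exact absurd ⟨d, hd, h2⟩ this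

theorem z2_changed : Claim_changed_z2 := by
  unfold Claim_changed_z2
  refine ⟨by decide, by decide, ?_, by decide, by decide⟩
  show z2 [[-3]] = false
  have h : z2Row [-3] = false := by
    rw [z2Row_eq]
    exact rowA_false [-3] (by decide)
  simp [z2, h]

theorem z2_tight : Claim_exact_z2 := by
  intro t _ hD
  obtain ⟨hall, row, hrow, hfail⟩ := hD
  have hB : z2_alt t = true := by
    rw [z2_alt_eq]
    simp only [List.all_eq_true, List.any_eq_true]
    intro r hr
    obtain ⟨k, hk, hex⟩ := hall r hr
    exact ⟨k, hk, (bElem_iff k).mpr hex⟩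
  have hA : z2 t = false := by
    rw [z2_eq, List.all_eq_false]
    exact ⟨row, hrow, by rw [Bool.not_eq_true]; exact rowA_false row hfail⟩
  rw [hA, hB]
  decide
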